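-- pv_equiv track=rewrite | github.com/r-uben/arxiv-mcp-server | src/arxiv_mcp_server/extraction/smart_extractor.py | _parse_academic_sections
-- ===== SOURCE A (Python) =====
-- from typing import Dict, Any, Optional, List
--
-- def _parse_academic_sections(content: str) -> Dict[str, str]:
--     """Parse academic paper sections from Mistral OCR output."""
--     sections = {}
--     if not content:
--         return sections
--
--     current_section = "abstract"
--     current_content = []
--
--     lines = content.split('\n')
--     for line in lines:
--         line = line.strip()
--
--         # Detect academic section headers
--         if line.lower().startswith('#'):
--             # Save previous section
--             if current_content:
--                 sections[current_section] = '\n'.join(current_content).strip()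
--
--             # Extract new section name
--             section_title = line.lstrip('#').strip().lower()
--
--             # Map to common academic sections
--             if 'abstract' in section_title:
--                 current_section = 'abstract'
--             elif any(word in section_title for word in ['introduction', 'intro']):
--                 current_section = 'introduction'
--             elif any(word in section_title for word in ['method', 'approach', 'technique']):
--                 current_section = 'methodology'
--             elif any(word in section_title for word in ['result', 'finding', 'experiment']):
--                 current_section = 'results'
--             elif any(word in section_title for word in ['discussion', 'analysis']):
--                 current_section = 'discussion'
--             elif any(word in section_title for word in ['conclusion', 'summary']):
--                 current_section = 'conclusion'
--             elif any(word in section_title for word in ['reference', 'bibliography']):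
--                 current_section = 'references'
--             else:
--                 current_section = section_title.replace(' ', '_')
--
--             current_content = []
--         else:
--             current_content.append(line)
--
--     # Save last section
--     if current_content:
--         sections[current_section] = '\n'.join(current_content).strip()
--
--     return sections
-- ===== SOURCE B (Python) =====
-- _KEYWORD_NAMES = [
--     ('abstract', 'abstract'),
--     ('introduction', 'introduction'), ('intro', 'introduction'),
--     ('method', 'methodology'), ('approach', 'methodology'), ('technique', 'methodology'),
--     ('result', 'results'), ('finding', 'results'), ('experiment', 'results'),
--     ('discussion', 'discussion'), ('analysis', 'discussion'),
--     ('conclusion', 'conclusion'), ('summary', 'conclusion'),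
--     ('reference', 'references'), ('bibliography', 'references'),
-- ]
--
--
-- def _resolve(title):
--     """Canonical name for a lowercased, de-#'d header title: first matching keyword."""
--     return next((name for kw, name in _KEYWORD_NAMES if kw in title),
--                 title.replace(' ', '_'))
--
--
-- def _split_sections(name, lines):
--     """Recursively split stripped lines at the first header into (name, block) pairs."""
--     head = next((k for k, ln in enumerate(lines) if ln.startswith('#')), None)
--     if head is None:
--         return [(name, lines)]
--     title = lines[head].lstrip('#').strip().lower()
--     return [(name, lines[:head])] + _split_sections(_resolve(title), lines[head + 1:])
--
--
-- def _parse_academic_sections(content):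
--     """Parse academic paper sections from Mistral OCR output."""
--     if not content:
--         return {}
--     lines = [ln.strip() for ln in content.split('\n')]
--     sections = {}
--     for name, block in _split_sections('abstract', lines):
--         if block:
--             sections[name] = '\n'.join(block).strip()
--     return sections
-- ===== Notes on version B (the rewrite author's own statement) =====
-- stated objective: alternative
-- what changed: Replaces A's single imperative loop with mutable (dict, current_section, current_content) state by a recursive divide-and-conquer splitter: find the first header line, cut the line list there, recurse on the remainder, yielding (name, block) pairs that a final loop writes into the dict; the grouped elif chain for name resolution becomes a first-match scan over a flattened (keyword, name) list.
import Mathlib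
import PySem

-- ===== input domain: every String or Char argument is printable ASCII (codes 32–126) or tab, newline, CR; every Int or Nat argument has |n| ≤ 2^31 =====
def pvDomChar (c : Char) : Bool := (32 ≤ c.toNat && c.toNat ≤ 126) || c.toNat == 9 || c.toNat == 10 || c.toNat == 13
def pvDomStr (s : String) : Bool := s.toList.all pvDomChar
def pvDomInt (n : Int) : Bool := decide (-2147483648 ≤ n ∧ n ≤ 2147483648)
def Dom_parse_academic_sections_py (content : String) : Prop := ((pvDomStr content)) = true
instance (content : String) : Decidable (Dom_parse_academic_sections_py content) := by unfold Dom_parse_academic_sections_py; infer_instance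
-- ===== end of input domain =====

-- B replaces A's single loop with mutable (dict, section, block) state by a recursive
-- splitter that cuts the line list at the first header and recurses on the remainder;
-- alternative decomposition, same cost class.

-- ===== PORT A =====
-- line.lstrip('#') ported exactly as dropping the leading '#' characters
def pvALstripHash (s : String) : String := String.ofList (s.toList.dropWhile (· == '#'))

-- the title computed from a header line: line.lstrip('#').strip().lower()
def pvATitle (line : String) : String := PySem.Str.lower (PySem.Str.strip (pvALstripHash line))

-- the body of A's 'for line in lines' loop, over state (sections, current_section, current_content)
def pvAStep (st : PySem.Dict String String × String × List String) (rawLine : String) :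
    PySem.Dict String String × String × List String :=
  if PySem.Str.startswith (PySem.Str.lower (PySem.Str.strip rawLine)) "#" then
    ((if st.2.2 ≠ [] then
        st.1.insert st.2.1 (PySem.Str.strip (PySem.Str.join "\n" st.2.2))
      else st.1),
     (if PySem.Str.isIn "abstract" (pvATitle (PySem.Str.strip rawLine)) then "abstract"
      else if ["introduction", "intro"].any (fun w => PySem.Str.isIn w (pvATitle (PySem.Str.strip rawLine))) then "introduction"
      else if ["method", "approach", "technique"].any (fun w => PySem.Str.isIn w (pvATitle (PySem.Str.strip rawLine))) then "methodology"
      else if ["result", "finding", "experiment"].any (fun w => PySem.Str.isIn w (pvATitle (PySem.Str.strip rawLine))) then "results"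
      else if ["discussion", "analysis"].any (fun w => PySem.Str.isIn w (pvATitle (PySem.Str.strip rawLine))) then "discussion"
      else if ["conclusion", "summary"].any (fun w => PySem.Str.isIn w (pvATitle (PySem.Str.strip rawLine))) then "conclusion"
      else if ["reference", "bibliography"].any (fun w => PySem.Str.isIn w (pvATitle (PySem.Str.strip rawLine))) then "references"
      else PySem.Str.replace (pvATitle (PySem.Str.strip rawLine)) " " "_"),
     [])
  else
    (st.1, st.2.1, st.2.2 ++ [PySem.Str.strip rawLine])

-- the trailing 'save last section' step
def pvAFinal (st : PySem.Dict String String × String × List String) : PySem.Dict String String :=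
  if st.2.2 ≠ [] then
    st.1.insert st.2.1 (PySem.Str.strip (PySem.Str.join "\n" st.2.2))
  else st.1

def parse_academic_sections_py (content : String) : List (String × String) :=
  if content = "" then []
  else
    ((pvAFinal (((PySem.Str.split? content "\n").getD []).foldl pvAStep
        (PySem.Dict.empty, "abstract", [])))).items   -- sep "\n" ≠ "": split? is never none

-- ===== PORT B =====
def pvKeywordNames : List (String × String) :=
  [("abstract", "abstract"),
   ("introduction", "introduction"), ("intro", "introduction"),
   ("method", "methodology"), ("approach", "methodology"), ("technique", "methodology"),
   ("result", "results"), ("finding", "results"), ("experiment", "results"),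
   ("discussion", "discussion"), ("analysis", "discussion"),
   ("conclusion", "conclusion"), ("summary", "conclusion"),
   ("reference", "references"), ("bibliography", "references")]

-- next((name for kw, name in _KEYWORD_NAMES if kw in title), title.replace(' ', '_'))
def pvResolve (title : String) : String :=
  match pvKeywordNames.find? (fun p => PySem.Str.isIn p.1 title) with
  | some p => p.2
  | none => PySem.Str.replace title " " "_"

-- recursive splitter: cut the (pre-stripped) line list at the first header
-- (next((k for k, ln in enumerate(lines) if ln.startswith('#')), None) is findIdx?)
def pvSplitSections (name : String) (lines : List String) : List (String × List String) :=
  match h : lines.findIdx? (fun ln => PySem.Str.startswith ln "#") with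
  | none => [(name, lines)]
  | some k =>
      (name, PySem.List.slice lines none (some (k : Int))) ::
        pvSplitSections
          (pvResolve (PySem.Str.lower (PySem.Str.strip
            (String.ofList ((lines.getD k "").toList.dropWhile (· == '#'))))))
          (PySem.List.slice lines (some ((k : Int) + 1)) none)
termination_by lines.length
decreasing_by
  have hk : k < lines.length := by
    have := List.findIdx?_eq_some_iff_findIdx_eq.mp h
    omega
  have e : PySem.List.slice lines (some ((k : Int) + 1)) none = lines.drop (k + 1) := by
    rw [PySem.List.slice_from lines (by positivity)]
    norm_num
  rw [e, List.length_drop]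
  omega

-- B's final write loop over the (name, block) pairs
def pvFlush (d : PySem.Dict String String) (segs : List (String × List String)) :
    PySem.Dict String String :=
  segs.foldl
    (fun d seg =>
      if seg.2 ≠ [] then d.insert seg.1 (PySem.Str.strip (PySem.Str.join "\n" seg.2)) else d) d

def parse_academic_sections_py_alt (content : String) : List (String × String) :=
  if content = "" then []
  else
    (pvFlush PySem.Dict.empty
      (pvSplitSections "abstract"
        (((PySem.Str.split? content "\n").getD []).map PySem.Str.strip))).items

-- ===== PRECONDITION & SPEC =====
def Spec_parse_academic_sections_py (content : String) (out : List (String × String)) : Prop := out = parse_academic_sections_py_alt content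
instance (content : String) (out : List (String × String)) : Decidable (Spec_parse_academic_sections_py content out) := by unfold Spec_parse_academic_sections_py; infer_instance

-- ===== CLAIM (what is proved, stated in full; the proofs are below) =====
def Claim_equal_parse_academic_sections_py : Prop := ∀ (content : String), Dom_parse_academic_sections_py content → Spec_parse_academic_sections_py content (parse_academic_sections_py content)

-- ===== LEMMAS AND PROOFS =====

-- lowering a character does not change whether it is '#'
theorem lowerChar_beq_hash (c : Char) : (PySem.Chars.lowerChar c == '#') = (c == '#') := by
  unfold PySem.Chars.lowerChar PySem.Chars.isupper
  split
  · next h =>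
    simp only [Bool.and_eq_true, decide_eq_true_eq, Char.le_def, UInt32.le_iff_toNat_le] at h
    have hA : ('A').val.toNat = 65 := by decide
    have hZ : ('Z').val.toNat = 90 := by decide
    have hb : c.toNat = c.val.toNat := rfl
    have hv : (c.toNat + 32).isValidChar := by left; rw [hb]; omega
    have ht : (Char.ofNat (c.toNat + 32)).toNat = c.toNat + 32 := by
      rw [Char.toNat_ofNat, if_pos hv]
    have h1 : (Char.ofNat (c.toNat + 32) == '#') = false := by
      simp only [beq_eq_false_iff_ne, ne_eq]
      intro e
      have h35 : (Char.ofNat (c.toNat + 32)).toNat = 35 := by rw [e]; decide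
      rw [ht, hb] at h35; omega
    have h2 : (c == '#') = false := by
      simp only [beq_eq_false_iff_ne, ne_eq]
      intro e
      rw [e] at h
      revert h; decide
    rw [h1, h2]
  · rfl

-- lowering a line does not change whether it starts with '#'
theorem startswith_lower_hash (s : String) :
    PySem.Str.startswith (PySem.Str.lower s) "#" = PySem.Str.startswith s "#" := by
  rw [PySem.Str.startswith_eq, PySem.Str.startswith_eq, PySem.Str.toList_lower]
  have : ("#" : String).toList = ['#'] := by decide
  rw [this]
  cases s.toList with
  | nil => rfl
  | cons c t =>
    simp only [PySem.Chars.lower, PySem.Chars.startswith, List.map_cons]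
    simp only [List.isPrefixOf, Bool.and_true]
    rw [Bool.beq_comm, lowerChar_beq_hash, Bool.beq_comm]

-- grouped keyword table used only by the proofs (A's elif groups)
def pvGroups : List (List String × String) :=
  [(["abstract"], "abstract"),
   (["introduction", "intro"], "introduction"),
   (["method", "approach", "technique"], "methodology"),
   (["result", "finding", "experiment"], "results"),
   (["discussion", "analysis"], "discussion"),
   (["conclusion", "summary"], "conclusion"),
   (["reference", "bibliography"], "references")]

-- scanning one flattened group is the group's any-test
theorem find?_group (t nm : String) (ws : List String) :
    ((ws.map (fun w => (w, nm))).find? (fun p => PySem.Str.isIn p.1 t)).map (fun p => p.2)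
      = if ws.any (fun w => PySem.Str.isIn w t) then some nm else none := by
  induction ws with
  | nil => rfl
  | cons w r ih =>
    simp only [List.map_cons, List.any_cons]
    by_cases h : PySem.Str.isIn w t = true
    · have hp : List.find? (fun p => PySem.Str.isIn p.1 t)
          ((w, nm) :: List.map (fun w => (w, nm)) r) = some (w, nm) :=
        List.find?_cons_of_pos h
      rw [hp]
      simp only [h, Option.map_some, Bool.true_or]
      rfl
    · have hp : List.find? (fun p => PySem.Str.isIn p.1 t)
          ((w, nm) :: List.map (fun w => (w, nm)) r) =
          List.find? (fun p => PySem.Str.isIn p.1 t) (List.map (fun w => (w, nm)) r) :=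
        List.find?_cons_of_neg h
      rw [hp, ih]
      simp only [Bool.eq_false_iff.mpr h, Bool.false_or]

-- first match over the flattened keyword list = first matching group
theorem find?_flatten (t : String) (gs : List (List String × String)) :
    ((gs.flatMap (fun g => g.1.map (fun w => (w, g.2)))).find?
        (fun p => PySem.Str.isIn p.1 t)).map (fun p => p.2)
      = (gs.find? (fun g => g.1.any (fun w => PySem.Str.isIn w t))).map (fun g => g.2) := by
  induction gs with
  | nil => rfl
  | cons g r ih =>
    have hmap : ∀ (x y : Option (String × String)),
        ((x.or y).map (fun p => p.2)) = ((x.map fun p => p.2).or (y.map fun p => p.2)) := by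
      intro x y; cases x <;> rfl
    rw [List.flatMap_cons, List.find?_append, hmap, find?_group, ih, List.find?_cons]
    cases h : g.1.any (fun w => PySem.Str.isIn w t) <;> simp

-- A's inline elif-chain and B's flattened keyword scan resolve the same name
theorem resolve_eq (t : String) :
    (if PySem.Str.isIn "abstract" t then "abstract"
     else if ["introduction", "intro"].any (fun w => PySem.Str.isIn w t) then "introduction"
     else if ["method", "approach", "technique"].any (fun w => PySem.Str.isIn w t) then "methodology"
     else if ["result", "finding", "experiment"].any (fun w => PySem.Str.isIn w t) then "results"
     else if ["discussion", "analysis"].any (fun w => PySem.Str.isIn w t) then "discussion"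
     else if ["conclusion", "summary"].any (fun w => PySem.Str.isIn w t) then "conclusion"
     else if ["reference", "bibliography"].any (fun w => PySem.Str.isIn w t) then "references"
     else PySem.Str.replace t " " "_") = pvResolve t := by
  have hm : ∀ (x : Option (String × String)) (fb : String),
      (match x with | some p => p.2 | none => fb) = (x.map (fun p => p.2)).getD fb := by
    intro x fb; cases x <;> rfl
  have hflat : pvKeywordNames = pvGroups.flatMap (fun g => g.1.map (fun w => (w, g.2))) := by
    rfl
  unfold pvResolve
  rw [hflat, hm, find?_flatten]
  unfold pvGroups
  simp only [List.find?, List.any_cons, List.any_nil, Bool.or_false]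
  cases PySem.Str.isIn "abstract" t <;>
  cases (PySem.Str.isIn "introduction" t || PySem.Str.isIn "intro" t) <;>
  cases (PySem.Str.isIn "method" t || (PySem.Str.isIn "approach" t || PySem.Str.isIn "technique" t)) <;>
  cases (PySem.Str.isIn "result" t || (PySem.Str.isIn "finding" t || PySem.Str.isIn "experiment" t)) <;>
  cases (PySem.Str.isIn "discussion" t || PySem.Str.isIn "analysis" t) <;>
  cases (PySem.Str.isIn "conclusion" t || PySem.Str.isIn "summary" t) <;>
  cases (PySem.Str.isIn "reference" t || PySem.Str.isIn "bibliography" t) <;> rfl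

-- prepend a pending block to the first segment (proof-side bookkeeping)
def pvPrepend (cc : List String) : List (String × List String) → List (String × List String)
  | [] => []
  | (n, b) :: r => (n, cc ++ b) :: r

theorem pvPrepend_nil (segs : List (String × List String)) : pvPrepend [] segs = segs := by
  cases segs with
  | nil => rfl
  | cons p r => cases p; simp [pvPrepend]

-- unfolding pvSplitSections when the head line is a header
theorem split_cons_pos (n hd : String) (tl : List String)
    (h : PySem.Str.startswith hd "#" = true) :
    pvSplitSections n (hd :: tl) =
      (n, []) :: pvSplitSections
        (pvResolve (PySem.Str.lower (PySem.Str.strip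
          (String.ofList (hd.toList.dropWhile (· == '#')))))) tl := by
  rw [pvSplitSections.eq_def]
  split
  · next heq =>
    rw [List.findIdx?_cons, h] at heq
    simp at heq
  · next k heq =>
    rw [List.findIdx?_cons, h] at heq
    simp at heq
    have hk : k = 0 := by omega
    subst hk
    have e1 : PySem.List.slice (hd :: tl) none (some ((0 : Nat) : Int)) = [] := by
      rw [PySem.List.slice_to_natCast]
      rfl
    have e2 : PySem.List.slice (hd :: tl) (some (((0 : Nat) : Int) + 1)) none = tl := by
      have h01 : (((0 : Nat) : Int) + 1) = ((1 : Nat) : Int) := by norm_num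
      rw [h01, PySem.List.slice_from_natCast]
      rfl
    rw [e1, e2, List.getD_cons_zero]

-- unfolding pvSplitSections when the head line is not a header
theorem split_cons_neg (n hd : String) (tl : List String)
    (h : PySem.Str.startswith hd "#" = false) :
    pvSplitSections n (hd :: tl) = pvPrepend [hd] (pvSplitSections n tl) := by
  rw [pvSplitSections.eq_def, pvSplitSections.eq_def]
  split
  · next heq =>
    rw [List.findIdx?_cons, h] at heq
    simp only [Bool.false_eq_true, if_false] at heq
    split
    · next heq2 => simp [pvPrepend]
    · next j heq2 => rw [heq2] at heq; simp at heq
  · next k heq =>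
    rw [List.findIdx?_cons, h] at heq
    simp only [Bool.false_eq_true, if_false] at heq
    split
    · next heq2 => rw [heq2] at heq; cases heq
    · next j heq2 =>
      rw [heq2] at heq
      have hk : k = j + 1 := by
        simp only [Option.map_some, Option.some.injEq] at heq
        omega
      subst hk
      have e1 : PySem.List.slice (hd :: tl) none (some ((j + 1 : Nat) : Int)) =
          hd :: PySem.List.slice tl none (some ((j : Nat) : Int)) := by
        rw [PySem.List.slice_to_natCast, PySem.List.slice_to_natCast, List.take_succ_cons]
      have e2 : PySem.List.slice (hd :: tl) (some (((j + 1 : Nat) : Int) + 1)) none =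
          PySem.List.slice tl (some (((j : Nat) : Int) + 1)) none := by
        have c1 : (((j + 1 : Nat) : Int) + 1) = ((j + 2 : Nat) : Int) := by push_cast; ring
        have c2 : (((j : Nat) : Int) + 1) = ((j + 1 : Nat) : Int) := by push_cast; ring
        rw [c1, c2, PySem.List.slice_from_natCast, PySem.List.slice_from_natCast]
        rfl
      have e3 : (hd :: tl).getD (j + 1) "" = tl.getD j "" := by simp
      rw [e1, e2, e3]
      simp [pvPrepend]

-- main invariant: A's running (dict, section, block) state corresponds to B's
-- recursive split of the remaining stripped lines, with the open block prepended
theorem main_inv (raws : List String) (d : PySem.Dict String String) (cur : String)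
    (cc : List String) :
    pvAFinal (raws.foldl pvAStep (d, cur, cc)) =
      pvFlush d (pvPrepend cc (pvSplitSections cur (raws.map PySem.Str.strip))) := by
  induction raws generalizing d cur cc with
  | nil =>
    simp only [List.foldl_nil, List.map_nil]
    rw [pvSplitSections]
    simp only [List.findIdx?_nil, pvPrepend, List.append_nil]
    rfl
  | cons raw rest ih =>
    simp only [List.foldl_cons, List.map_cons]
    by_cases h : PySem.Str.startswith (PySem.Str.strip raw) "#"
    · have hA : pvAStep (d, cur, cc) raw =
          ((if cc ≠ [] then d.insert cur (PySem.Str.strip (PySem.Str.join "\n" cc)) else d),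
           pvResolve (pvATitle (PySem.Str.strip raw)), []) := by
        unfold pvAStep
        rw [startswith_lower_hash, if_pos h, resolve_eq]
      rw [hA, ih, split_cons_pos _ _ _ h, pvPrepend_nil]
      have : pvResolve (PySem.Str.lower (PySem.Str.strip
          (String.ofList ((PySem.Str.strip raw).toList.dropWhile (· == '#'))))) =
          pvResolve (pvATitle (PySem.Str.strip raw)) := rfl
      rw [this]
      simp only [pvPrepend, List.append_nil]
      rfl
    · have hA : pvAStep (d, cur, cc) raw = (d, cur, cc ++ [PySem.Str.strip raw]) := by
        unfold pvAStep
        rw [startswith_lower_hash, if_neg h]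
      rw [hA, ih, split_cons_neg _ _ _ (Bool.eq_false_iff.mpr h)]
      cases hs : pvSplitSections cur (rest.map PySem.Str.strip) with
      | nil => simp [pvPrepend]
      | cons p r =>
        cases p
        simp [pvPrepend, pvFlush]

-- ===== VERDICT (by name: the statement is the Claim_ definition above) =====
theorem parse_academic_sections_py_spec : Claim_equal_parse_academic_sections_py := by
  intro content _
  unfold Spec_parse_academic_sections_py parse_academic_sections_py parse_academic_sections_py_alt
  by_cases h : content = ""
  · rw [if_pos h, if_pos h]
  · rw [if_neg h, if_neg h, main_inv, pvPrepend_nil]
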